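-- pv_equiv track=rewrite | github.com/ttopbg/pccm_v1 | teacher_core.py | _enumerate_splits
-- ===== SOURCE A (Python) =====
-- def _enumerate_splits(grade, alpha, digits, known_classes):
--     """
--     Liệt kê TẤT CẢ các cách tách hợp lệ của chuỗi `digits` sau prefix `grade+alpha`,
--     trong đó mỗi phần đều thuộc known_classes.
--     Trả về list of list[str], mỗi phần tử là một cách tách.
--     Chỉ trả về các cách mà TOÀN BỘ mảnh đều nằm trong known_classes.
--     """
--     n = len(digits)
--     results = []
--
--     def backtrack(pos, current):
--         if pos == n:
--             results.append(list(current))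
--             return
--         for length in range(1, n - pos + 1):
--             candidate = f"{grade}{alpha}{digits[pos:pos+length]}"
--             if candidate in known_classes:
--                 current.append(candidate)
--                 backtrack(pos + length, current)
--                 current.pop()
--
--     backtrack(0, [])
--     return results
-- ===== SOURCE B (Python) =====
-- def _enumerate_splits(grade, alpha, digits, known_classes):
--     n = len(digits)
--     prefix = grade + alpha
--     # forward pass: which positions are reachable from 0 through known pieces
--     reach = [False] * (n + 1)
--     reach[0] = True
--     for pos in range(n):
--         if reach[pos]:
--             for length in range(1, n - pos + 1):
--                 if prefix + digits[pos:pos + length] in known_classes: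
--                     reach[pos + length] = True
--     # backward pass: assemble the split list of each reachable position once;
--     # dp holds the rows for positions pos+1 .. n (dp[0] is pos+1)
--     dp = [[[]]]
--     for pos in range(n - 1, -1, -1):
--         row = []
--         if reach[pos]:
--             for length in range(1, n - pos + 1):
--                 candidate = prefix + digits[pos:pos + length]
--                 if candidate in known_classes:
--                     row.extend([candidate] + rest for rest in dp[length - 1])
--         dp.insert(0, row)
--     return dp[0]
-- ===== Notes on version B (the rewrite author's own statement) =====
-- stated objective: alternative
-- what changed: Replaced A's recursive backtracking (prefix accumulator + shared results list, suffixes re-explored per prefix path) with two iterative passes: a forward reachability scan that marks the positions reachable from 0 through known pieces, then a bottom-up table built from n down to 0 whose rows are computed once per reachable position and shared.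
import Mathlib
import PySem

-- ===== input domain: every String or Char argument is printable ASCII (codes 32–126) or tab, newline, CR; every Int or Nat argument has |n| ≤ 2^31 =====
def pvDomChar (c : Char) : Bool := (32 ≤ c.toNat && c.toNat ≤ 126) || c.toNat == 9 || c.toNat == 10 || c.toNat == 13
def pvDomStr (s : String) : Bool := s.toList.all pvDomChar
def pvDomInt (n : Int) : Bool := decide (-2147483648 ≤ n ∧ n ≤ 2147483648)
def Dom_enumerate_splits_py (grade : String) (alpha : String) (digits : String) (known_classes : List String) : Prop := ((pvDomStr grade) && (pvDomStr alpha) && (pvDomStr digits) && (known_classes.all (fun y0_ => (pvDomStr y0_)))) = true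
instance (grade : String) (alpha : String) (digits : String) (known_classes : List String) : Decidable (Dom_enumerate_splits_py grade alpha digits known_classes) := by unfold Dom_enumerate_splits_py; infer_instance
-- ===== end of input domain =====

-- B replaces A's recursive backtracking by two iterative passes (a forward reachability scan,
-- then a bottom-up table of split lists, one row per reachable position); same return value.

-- ===== PORT A =====
-- A's backtrack(pos, current) with the mutable `results` list threaded as an accumulator.
-- `fuel` is a termination device only: the top-level call passes fuel = n and pos advances by ≥ 1
-- per level, so the fuel-0 branch is never reached from enumerate_splits_py.
def pvBtA (grade alpha : String) (ds : List Char) (known : List String) (n : Nat) :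
    Nat → Nat → List String → List (List String) → List (List String)
  | fuel, pos, current, results =>
    if pos = n then results ++ [current]
    else
      match fuel with
      | 0 => results
      | fuel' + 1 =>
        (List.range' 1 (n - pos)).foldl
          (fun res (len : Nat) =>
            let candidate := grade ++ alpha ++
              String.ofList (PySem.List.slice ds (some (pos : Int)) (some ((pos : Int) + (len : Int))))
            if known.contains candidate then
              pvBtA grade alpha ds known n fuel' (pos + len) (current ++ [candidate]) res
            else res)
          results

def enumerate_splits_py (grade : String) (alpha : String) (digits : String) (known_classes : List String) : List (List String) :=
  pvBtA grade alpha digits.toList known_classes digits.toList.length digits.toList.length 0 [] []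

-- ===== PORT B =====
-- one iteration of B's forward pass: if pos is marked reachable, mark every pos+length
-- whose candidate is a known class (reach is Python's boolean list of length n+1)
def pvStepR (pfx : String) (ds : List Char) (n : Nat) (known : List String)
    (reach : List Bool) (pos : Nat) : List Bool :=
  if reach.getD pos false then
    (List.range' 1 (n - pos)).foldl
      (fun r (len : Nat) =>
        if known.contains (pfx ++
            String.ofList (PySem.List.slice ds (some (pos : Int)) (some ((pos : Int) + (len : Int))))) then
          r.set (pos + len) true
        else r)
      reach
  else reach

-- B's forward pass: reach = [True] + [False]*n, then for pos in range(n) propagate marks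
def pvReach (pfx : String) (ds : List Char) (n : Nat) (known : List String) : List Bool :=
  (List.range n).foldl (pvStepR pfx ds n known) ((List.replicate (n + 1) false).set 0 true)

-- the inner `for length` loop of B's backward pass: the row for position pos, read off the
-- table dp, guarded by reach[pos]; dp lists the rows of positions pos+1 .. n (head = pos+1;
-- getD's [] default is unreachable)
def pvRowB (pfx : String) (ds : List Char) (n : Nat) (known : List String)
    (reach : List Bool) (dp : List (List (List String))) (pos : Nat) : List (List String) :=
  if reach.getD pos false then
    (List.range' 1 (n - pos)).foldl
      (fun row (len : Nat) =>
        let candidate := pfx ++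
          String.ofList (PySem.List.slice ds (some (pos : Int)) (some ((pos : Int) + (len : Int))))
        if known.contains candidate then
          row ++ (dp.getD (len - 1) []).map (fun rest => candidate :: rest)
        else row)
      []
  else []

-- B: `dp = [[[]]]`, then for pos = n-1 … 0 prepend the row for pos; answer is dp[0]
def enumerate_splits_py_alt (grade : String) (alpha : String) (digits : String) (known_classes : List String) : List (List String) :=
  let ds := digits.toList
  let n := ds.length
  let pfx := grade ++ alpha
  let reach := pvReach pfx ds n known_classes
  ((List.range n).foldl
      (fun dp (k : Nat) => pvRowB pfx ds n known_classes reach dp (n - 1 - k) :: dp)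
      [[[]]]).headD []

-- ===== PRECONDITION & SPEC =====
def Spec_enumerate_splits_py (grade : String) (alpha : String) (digits : String) (known_classes : List String) (out : List (List String)) : Prop := out = enumerate_splits_py_alt grade alpha digits known_classes
instance (grade : String) (alpha : String) (digits : String) (known_classes : List String) (out : List (List String)) : Decidable (Spec_enumerate_splits_py grade alpha digits known_classes out) := by unfold Spec_enumerate_splits_py; infer_instance

-- ===== CLAIM (what is proved, stated in full; the proofs are below) =====
def Claim_equal_enumerate_splits_py : Prop := ∀ (grade : String) (alpha : String) (digits : String) (known_classes : List String), Dom_enumerate_splits_py grade alpha digits known_classes → Spec_enumerate_splits_py grade alpha digits known_classes (enumerate_splits_py grade alpha digits known_classes)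

-- ===== LEMMAS AND PROOFS =====

-- reference function: the list of valid splits of the suffix starting at pos (same fuel discipline as pvBtA)
def pvS (grade alpha : String) (ds : List Char) (known : List String) (n : Nat) :
    Nat → Nat → List (List String)
  | fuel, pos =>
    if pos = n then [[]]
    else
      match fuel with
      | 0 => []
      | fuel' + 1 =>
        (List.range' 1 (n - pos)).foldl
          (fun acc (len : Nat) =>
            let candidate := grade ++ alpha ++
              String.ofList (PySem.List.slice ds (some (pos : Int)) (some ((pos : Int) + (len : Int))))
            if known.contains candidate then
              acc ++ (pvS grade alpha ds known n fuel' (pos + len)).map (fun rest => candidate :: rest)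
            else acc)
          []

lemma pvS_fuel_irrel (grade alpha : String) (ds : List Char) (known : List String) (n : Nat) :
    ∀ fuel₁ fuel₂ pos, n - pos ≤ fuel₁ → n - pos ≤ fuel₂ →
      pvS grade alpha ds known n fuel₁ pos = pvS grade alpha ds known n fuel₂ pos := by
  intro fuel₁
  induction fuel₁ with
  | zero =>
    intro fuel₂ pos h1 h2
    by_cases hp : pos = n
    · cases fuel₂ <;> simp [pvS, hp]
    · have hn : n - pos = 0 := Nat.le_zero.mp h1
      cases fuel₂ with
      | zero => rfl
      | succ f => simp [pvS, hp, hn]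
  | succ f ih =>
    intro fuel₂ pos h1 h2
    by_cases hp : pos = n
    · cases fuel₂ <;> simp [pvS, hp]
    · rcases Nat.eq_zero_or_pos (n - pos) with hn | hn
      · cases fuel₂ with
        | zero => simp [pvS, hp, hn]
        | succ g => simp [pvS, hp, hn]
      · obtain ⟨g, rfl⟩ : ∃ g, fuel₂ = g + 1 := by
          cases fuel₂ with
          | zero => omega
          | succ g => exact ⟨g, rfl⟩
        show pvS grade alpha ds known n (f+1) pos = pvS grade alpha ds known n (g+1) pos
        simp only [pvS, hp, if_false]
        apply PySem.List.foldl_congr_mem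
        intro acc len hlen
        have hb := List.mem_range'.mp hlen
        have : pvS grade alpha ds known n f (pos + len) = pvS grade alpha ds known n g (pos + len) := by
          apply ih <;> omega
        simp [this]

lemma pvBtA_eq_pvS (grade alpha : String) (ds : List Char) (known : List String) (n : Nat) :
    ∀ fuel pos current results, n - pos ≤ fuel →
      pvBtA grade alpha ds known n fuel pos current results
        = results ++ (pvS grade alpha ds known n fuel pos).map (fun s => current ++ s) := by
  intro fuel
  induction fuel with
  | zero =>
    intro pos current results h
    by_cases hp : pos = n
    · simp [pvBtA, pvS, hp]
    · simp [pvBtA, pvS, hp]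
  | succ f ih =>
    intro pos current results h
    by_cases hp : pos = n
    · simp [pvBtA, pvS, hp]
    · simp only [pvBtA, pvS, hp, if_false]
      have aux : ∀ (L : List Nat), (∀ len ∈ L, 1 ≤ len) → ∀ (acc : List (List String)) (R : List (List String)),
          L.foldl
            (fun res (len : Nat) =>
              let candidate := grade ++ alpha ++
                String.ofList (PySem.List.slice ds (some (pos : Int)) (some ((pos : Int) + (len : Int))))
              if known.contains candidate then
                pvBtA grade alpha ds known n f (pos + len) (current ++ [candidate]) res
              else res)
            (R ++ acc.map (fun s => current ++ s))
          = R ++ (L.foldl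
              (fun a (len : Nat) =>
                let candidate := grade ++ alpha ++
                  String.ofList (PySem.List.slice ds (some (pos : Int)) (some ((pos : Int) + (len : Int))))
                if known.contains candidate then
                  a ++ (pvS grade alpha ds known n f (pos + len)).map (fun rest => candidate :: rest)
                else a)
              acc).map (fun s => current ++ s) := by
        intro L
        induction L with
        | nil => intro _ acc R; rfl
        | cons len L ihL =>
          intro hL acc R
          have hlen : 1 ≤ len := hL len (List.mem_cons_self ..)
          have hL' : ∀ l ∈ L, 1 ≤ l := fun l hl => hL l (List.mem_cons_of_mem _ hl)
          simp only [List.foldl_cons]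
          by_cases hc : known.contains (grade ++ alpha ++
              String.ofList (PySem.List.slice ds (some (pos : Int)) (some ((pos : Int) + (len : Int)))))
          · simp only [hc, if_true]
            rw [ih (pos + len) (current ++ [grade ++ alpha ++
                String.ofList (PySem.List.slice ds (some (pos : Int)) (some ((pos : Int) + (len : Int))))]) _ (by omega)]
            have hmap : (pvS grade alpha ds known n f (pos + len)).map
                  (fun s => (current ++ [grade ++ alpha ++
                    String.ofList (PySem.List.slice ds (some (pos : Int)) (some ((pos : Int) + (len : Int))))]) ++ s)
                = ((pvS grade alpha ds known n f (pos + len)).map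
                    (fun rest => (grade ++ alpha ++
                      String.ofList (PySem.List.slice ds (some (pos : Int)) (some ((pos : Int) + (len : Int))))) :: rest)).map
                    (fun s => current ++ s) := by
              simp [List.map_map, Function.comp]
            rw [hmap, List.append_assoc, ← List.map_append]
            exact ihL hL' _ R
          · simp only [hc]
            exact ihL hL' acc R
      have := aux (List.range' 1 (n - pos))
        (fun len hlen => by have := List.mem_range'.mp hlen; omega) [] results
      simpa using this

-- ---- properties of the forward reachability pass ----

lemma pvSetTrue_getD (r : List Bool) (i j : Nat) (h : r.getD i false = true) :
    (r.set j true).getD i false = true := by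
  by_cases hij : i = j
  · subst hij
    by_cases hlt : i < r.length
    · simp [List.getD, hlt]
    · rw [List.set_eq_of_length_le (by omega)]
      exact h
  · simpa [List.getD, List.getElem?_set_ne (fun h' => hij h'.symm)] using h

lemma pvInnerR_length (pfx : String) (ds : List Char) (known : List String) (pos : Nat) :
    ∀ (L : List Nat) (r : List Bool),
      (L.foldl
        (fun r (len : Nat) =>
          if known.contains (pfx ++
              String.ofList (PySem.List.slice ds (some (pos : Int)) (some ((pos : Int) + (len : Int))))) then
            r.set (pos + len) true
          else r)
        r).length = r.length := by
  intro L
  induction L with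
  | nil => intro r; rfl
  | cons len L ihL =>
    intro r
    simp only [List.foldl_cons]
    by_cases hc : known.contains (pfx ++
        String.ofList (PySem.List.slice ds (some (pos : Int)) (some ((pos : Int) + (len : Int))))) = true
    · rw [if_pos hc, ihL, List.length_set]
    · rw [if_neg hc]
      exact ihL r

lemma pvInnerR_mono (pfx : String) (ds : List Char) (known : List String) (pos i : Nat) :
    ∀ (L : List Nat) (r : List Bool), r.getD i false = true →
      (L.foldl
        (fun r (len : Nat) =>
          if known.contains (pfx ++
              String.ofList (PySem.List.slice ds (some (pos : Int)) (some ((pos : Int) + (len : Int))))) then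
            r.set (pos + len) true
          else r)
        r).getD i false = true := by
  intro L
  induction L with
  | nil => intro r h; exact h
  | cons len L ihL =>
    intro r h
    simp only [List.foldl_cons]
    by_cases hc : known.contains (pfx ++
        String.ofList (PySem.List.slice ds (some (pos : Int)) (some ((pos : Int) + (len : Int)))))
    · simp only [hc, if_true]
      exact ihL _ (pvSetTrue_getD r i (pos + len) h)
    · simp only [hc]
      exact ihL _ h

lemma pvStepR_mono (pfx : String) (ds : List Char) (n : Nat) (known : List String)
    (r : List Bool) (pos i : Nat) (h : r.getD i false = true) :
    (pvStepR pfx ds n known r pos).getD i false = true := by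
  unfold pvStepR
  by_cases hr : r.getD pos false = true
  · rw [if_pos hr]
    exact pvInnerR_mono pfx ds known pos i _ r h
  · rw [if_neg hr]
    exact h

lemma pvStepR_stable (pfx : String) (ds : List Char) (n : Nat) (known : List String)
    (r : List Bool) (pos i : Nat) (hle : i ≤ pos) :
    (pvStepR pfx ds n known r pos).getD i false = r.getD i false := by
  unfold pvStepR
  by_cases hr : r.getD pos false = true
  · rw [if_pos hr]
    have aux : ∀ (L : List Nat), (∀ len ∈ L, 1 ≤ len) → ∀ (r' : List Bool),
        (L.foldl
          (fun r (len : Nat) =>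
            if known.contains (pfx ++
                String.ofList (PySem.List.slice ds (some (pos : Int)) (some ((pos : Int) + (len : Int))))) then
              r.set (pos + len) true
            else r)
          r').getD i false = r'.getD i false := by
      intro L
      induction L with
      | nil => intro _ r'; rfl
      | cons len L ihL =>
        intro hL r'
        have hlen : 1 ≤ len := hL len (List.mem_cons_self ..)
        have hL' : ∀ l ∈ L, 1 ≤ l := fun l hl => hL l (List.mem_cons_of_mem _ hl)
        simp only [List.foldl_cons]
        by_cases hc : known.contains (pfx ++
            String.ofList (PySem.List.slice ds (some (pos : Int)) (some ((pos : Int) + (len : Int)))))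
        · simp only [hc, if_true]
          rw [ihL hL']
          have hne : pos + len ≠ i := by omega
          simp [List.getD, List.getElem?_set_ne hne]
        · simp only [hc]
          exact ihL hL' r'
    exact aux (List.range' 1 (n - pos))
      (fun len hlen => by have := List.mem_range'.mp hlen; omega) r
  · rw [if_neg hr]

lemma pvFoldR_mono (pfx : String) (ds : List Char) (n : Nat) (known : List String) (i : Nat) :
    ∀ (L : List Nat) (r : List Bool), r.getD i false = true →
      (L.foldl (pvStepR pfx ds n known) r).getD i false = true := by
  intro L
  induction L with
  | nil => intro r h; exact h
  | cons pos L ihL =>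
    intro r h
    simp only [List.foldl_cons]
    exact ihL _ (pvStepR_mono pfx ds n known r pos i h)

lemma pvFoldR_stable (pfx : String) (ds : List Char) (n : Nat) (known : List String) (i : Nat) :
    ∀ (L : List Nat) (r : List Bool), (∀ q ∈ L, i ≤ q) →
      (L.foldl (pvStepR pfx ds n known) r).getD i false = r.getD i false := by
  intro L
  induction L with
  | nil => intro r _; rfl
  | cons pos L ihL =>
    intro r hL
    simp only [List.foldl_cons]
    rw [ihL _ (fun q hq => hL q (List.mem_cons_of_mem _ hq))]
    exact pvStepR_stable pfx ds n known r pos i (hL pos (List.mem_cons_self ..))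

lemma pvStepR_length (pfx : String) (ds : List Char) (n : Nat) (known : List String)
    (r : List Bool) (pos : Nat) : (pvStepR pfx ds n known r pos).length = r.length := by
  unfold pvStepR
  by_cases hr : r.getD pos false = true
  · rw [if_pos hr]
    exact pvInnerR_length pfx ds known pos _ r
  · rw [if_neg hr]

lemma pvFoldR_length (pfx : String) (ds : List Char) (n : Nat) (known : List String) :
    ∀ (L : List Nat) (r : List Bool), (L.foldl (pvStepR pfx ds n known) r).length = r.length := by
  intro L
  induction L with
  | nil => intro r; rfl
  | cons pos L ihL =>
    intro r
    simp only [List.foldl_cons]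
    rw [ihL, pvStepR_length]

lemma pvInnerR_marks (pfx : String) (ds : List Char) (known : List String) (pos len₀ : Nat)
    (hc : known.contains (pfx ++
        String.ofList (PySem.List.slice ds (some (pos : Int)) (some ((pos : Int) + (len₀ : Int))))) = true) :
    ∀ (L : List Nat) (r : List Bool), len₀ ∈ L → pos + len₀ < r.length →
      (L.foldl
        (fun r (len : Nat) =>
          if known.contains (pfx ++
              String.ofList (PySem.List.slice ds (some (pos : Int)) (some ((pos : Int) + (len : Int))))) then
            r.set (pos + len) true
          else r)
        r).getD (pos + len₀) false = true := by
  intro L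
  induction L with
  | nil => intro r h _; cases h
  | cons len L ihL =>
    intro r hmem hlt
    simp only [List.foldl_cons]
    rcases List.mem_cons.mp hmem with heq | htail
    · subst heq
      simp only [hc, if_true]
      apply pvInnerR_mono
      simp [List.getD, hlt]
    · by_cases hc' : known.contains (pfx ++
          String.ofList (PySem.List.slice ds (some (pos : Int)) (some ((pos : Int) + (len : Int)))))
      · simp only [hc', if_true]
        exact ihL _ htail (by simpa using hlt)
      · simp only [hc']
        exact ihL _ htail hlt

lemma pvReach_zero (pfx : String) (ds : List Char) (n : Nat) (known : List String) :
    (pvReach pfx ds n known).getD 0 false = true := by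
  unfold pvReach
  apply pvFoldR_mono
  have h0 : (0:Nat) < ((List.replicate (n + 1) false) : List Bool).length := by simp
  simp [List.getD]

lemma pvReach_closed (pfx : String) (ds : List Char) (n : Nat) (known : List String)
    (pos len : Nat) (hpos : pos < n) (h1 : 1 ≤ len) (h2 : len ≤ n - pos)
    (hreach : (pvReach pfx ds n known).getD pos false = true)
    (hc : known.contains (pfx ++
        String.ofList (PySem.List.slice ds (some (pos : Int)) (some ((pos : Int) + (len : Int))))) = true) :
    (pvReach pfx ds n known).getD (pos + len) false = true := by
  have hsplit : List.range n = List.range' 0 pos ++ pos :: List.range' (pos + 1) (n - pos - 1) := by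
    conv_lhs => rw [List.range_eq_range', show n = pos + ((n - pos - 1) + 1) by omega]
    rw [← List.range'_append (s := 0) (m := pos), Nat.zero_add, Nat.one_mul, List.range'_succ]
  unfold pvReach at *
  rw [hsplit] at hreach ⊢
  rw [List.foldl_append, List.foldl_cons] at hreach ⊢
  set r₁ := (List.range' 0 pos).foldl (pvStepR pfx ds n known)
      ((List.replicate (n + 1) false).set 0 true) with hr₁
  have hstab : ((List.range' (pos + 1) (n - pos - 1)).foldl (pvStepR pfx ds n known)
        (pvStepR pfx ds n known r₁ pos)).getD pos false
      = (pvStepR pfx ds n known r₁ pos).getD pos false := by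
    apply pvFoldR_stable
    intro q hq
    have := List.mem_range'.mp hq
    omega
  rw [hstab, pvStepR_stable pfx ds n known r₁ pos pos (le_refl pos)] at hreach
  apply pvFoldR_mono
  unfold pvStepR
  simp only [hreach, if_true]
  apply pvInnerR_marks pfx ds known pos len hc
  · exact List.mem_range'_1.mpr ⟨by omega, by omega⟩
  · have : r₁.length = n + 1 := by rw [hr₁, pvFoldR_length]; simp
    omega

-- ---- the backward table ----

-- the table invariant after k loop iterations: dp lists the rows of positions n-k .. n
-- (the true split list at a reachable position, [] at an unreachable one)
def pvInv (grade alpha : String) (ds : List Char) (known : List String) (n k : Nat)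
    (dp : List (List (List String))) : Prop :=
  dp.length = k + 1 ∧
    ∀ j, j ≤ k → dp.getD j []
      = if (n - k + j = n ∨ (pvReach (grade ++ alpha) ds n known).getD (n - k + j) false = true) then
          pvS grade alpha ds known n (k - j) (n - k + j)
        else []

lemma pvRowB_spec (grade alpha : String) (ds : List Char) (known : List String) (n k : Nat)
    (dp : List (List (List String))) (hk : k < n)
    (hInv : pvInv grade alpha ds known n k dp) :
    pvRowB (grade ++ alpha) ds n known (pvReach (grade ++ alpha) ds n known) dp (n - 1 - k)
      = if (pvReach (grade ++ alpha) ds n known).getD (n - 1 - k) false = true then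
          pvS grade alpha ds known n (k + 1) (n - 1 - k)
        else [] := by
  have hpos : n - 1 - k ≠ n := by omega
  have hspan : n - (n - 1 - k) = k + 1 := by omega
  unfold pvRowB
  by_cases hr : (pvReach (grade ++ alpha) ds n known).getD (n - 1 - k) false = true
  · rw [if_pos hr, if_pos hr]
    rw [hspan]
    simp only [pvS, hpos, if_false]
    rw [hspan]
    apply PySem.List.foldl_congr_mem
    intro acc len hlen
    have hb := List.mem_range'.mp hlen
    by_cases hc : known.contains ((grade ++ alpha) ++
        String.ofList (PySem.List.slice ds (some ((n - 1 - k : Nat) : Int)) (some (((n - 1 - k : Nat) : Int) + (len : Int))))) = true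
    · have hreach' : (pvReach (grade ++ alpha) ds n known).getD ((n - 1 - k) + len) false = true :=
        pvReach_closed (grade ++ alpha) ds n known (n - 1 - k) len (by omega) (by omega) (by omega) hr hc
      have hget : dp.getD (len - 1) []
          = if (n - k + (len - 1) = n ∨ (pvReach (grade ++ alpha) ds n known).getD (n - k + (len - 1)) false = true) then
              pvS grade alpha ds known n (k - (len - 1)) (n - k + (len - 1))
            else [] :=
        hInv.2 (len - 1) (by omega)
      have hposeq : n - k + (len - 1) = (n - 1 - k) + len := by omega
      rw [hposeq] at hget
      rw [if_pos (Or.inr hreach')] at hget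
      have hfuel : pvS grade alpha ds known n (k - (len - 1)) ((n - 1 - k) + len)
          = pvS grade alpha ds known n k ((n - 1 - k) + len) := by
        apply pvS_fuel_irrel <;> omega
      rw [hfuel] at hget
      simp only [hget, String.append_assoc]
    · have hc' : known.contains ((grade ++ alpha) ++
          String.ofList (PySem.List.slice ds (some ((n - 1 - k : Nat) : Int)) (some (((n - 1 - k : Nat) : Int) + (len : Int))))) = false := by
        simpa using hc
      have hc'' : known.contains (grade ++ (alpha ++
          String.ofList (PySem.List.slice ds (some ((n - 1 - k : Nat) : Int)) (some (((n - 1 - k : Nat) : Int) + (len : Int)))))) = false := by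
        rw [← String.append_assoc]
        exact hc'
      simp only [hc', Bool.false_eq_true, if_false]
  · rw [if_neg hr, if_neg hr]

lemma pvTable_inv (grade alpha : String) (ds : List Char) (known : List String) (n : Nat) :
    ∀ k, k ≤ n →
      pvInv grade alpha ds known n k
        ((List.range k).foldl
          (fun dp (k' : Nat) =>
            pvRowB (grade ++ alpha) ds n known (pvReach (grade ++ alpha) ds n known) dp (n - 1 - k') :: dp)
          [[[]]]) := by
  intro k
  induction k with
  | zero =>
    intro _
    refine ⟨rfl, ?_⟩
    intro j hj
    interval_cases j
    have h1 : n - 0 + 0 = n := by omega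
    rw [h1, if_pos (Or.inl rfl)]
    simp [pvS]
  | succ k ih =>
    intro hk
    have hInv := ih (by omega)
    rw [List.range_succ, List.foldl_append, List.foldl_cons, List.foldl_nil]
    set dp := (List.range k).foldl
        (fun dp (k' : Nat) =>
          pvRowB (grade ++ alpha) ds n known (pvReach (grade ++ alpha) ds n known) dp (n - 1 - k') :: dp)
        [[[]]] with hdp
    have hrow := pvRowB_spec grade alpha ds known n k dp (by omega) hInv
    refine ⟨by simp [hInv.1], ?_⟩
    intro j hj
    cases j with
    | zero =>
      have e1 : k + 1 - 0 = k + 1 := by omega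
      have e2 : n - (k + 1) + 0 = n - 1 - k := by omega
      rw [e1, e2]
      have hcond : ((n - 1 - k = n) ∨
            ((pvReach (grade ++ alpha) ds n known).getD (n - 1 - k) false = true))
          ↔ ((pvReach (grade ++ alpha) ds n known).getD (n - 1 - k) false = true) :=
        or_iff_right (by omega)
      rw [if_congr hcond rfl rfl]
      simpa using hrow
    | succ j =>
      have hstep : (pvRowB (grade ++ alpha) ds n known (pvReach (grade ++ alpha) ds n known) dp (n - 1 - k) :: dp).getD (j + 1) []
          = dp.getD j [] := by simp
      have e1 : k + 1 - (j + 1) = k - j := by omega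
      have e2 : n - (k + 1) + (j + 1) = n - k + j := by omega
      rw [hstep, e1, e2, hInv.2 j (by omega)]

-- ===== VERDICT (by name: the statement is the Claim_ definition above) =====
theorem enumerate_splits_py_spec : Claim_equal_enumerate_splits_py := by
  intro grade alpha digits known_classes _
  show enumerate_splits_py grade alpha digits known_classes
      = enumerate_splits_py_alt grade alpha digits known_classes
  show pvBtA grade alpha digits.toList known_classes digits.toList.length digits.toList.length 0 [] []
      = ((List.range digits.toList.length).foldl
          (fun dp (k : Nat) => pvRowB (grade ++ alpha) digits.toList digits.toList.length known_classes
            (pvReach (grade ++ alpha) digits.toList digits.toList.length known_classes) dp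
            (digits.toList.length - 1 - k) :: dp)
          [[[]]]).headD []
  set ds := digits.toList with hds
  set n := ds.length with hn
  rw [pvBtA_eq_pvS grade alpha ds known_classes n n 0 [] [] (by omega)]
  have hInv := pvTable_inv grade alpha ds known_classes n n (le_refl n)
  have hhead : ∀ (l : List (List (List String))), l.headD [] = l.getD 0 [] := by
    intro l; cases l <;> rfl
  rw [hhead, hInv.2 0 (by omega)]
  have e1 : n - 0 = n := by omega
  have e2 : n - n + 0 = 0 := by omega
  rw [e1, e2, if_pos (Or.inr (pvReach_zero (grade ++ alpha) ds n known_classes))]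
  simp
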